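-- pv_equiv track=rewrite | github.com/dipendrachoudhary047/practice-python | problems/all_char_have_equal_occurance.py | checkOccurrence
-- ===== SOURCE A (Python) =====
-- def checkOccurrence(s: str) -> bool:
--     dict = {}
--     for char in s:
--         dict[char] = s.count(char)
--
--     value = list(dict.values())
--     for x in value:
--         if x != value[0]:
--             return False
--     else:
--         return True
-- ===== SOURCE B (Python) =====
-- def checkOccurrence(s: str) -> bool:
--     chars = sorted(s)
--     runs = []
--     i = 0
--     n = len(chars)
--     while i < n:
--         j = i
--         while j < n and chars[j] == chars[i]:
--             j += 1
--         runs.append(j - i)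
--         i = j
--     return all(r == runs[0] for r in runs)
-- ===== Notes on version B (the rewrite author's own statement) =====
-- stated objective: faster
-- what changed: Instead of building a dict of per-character counts via repeated s.count scans (quadratic), B sorts the string once and walks it grouping consecutive equal characters into run lengths, returning True iff all run lengths are equal.
import Mathlib
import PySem

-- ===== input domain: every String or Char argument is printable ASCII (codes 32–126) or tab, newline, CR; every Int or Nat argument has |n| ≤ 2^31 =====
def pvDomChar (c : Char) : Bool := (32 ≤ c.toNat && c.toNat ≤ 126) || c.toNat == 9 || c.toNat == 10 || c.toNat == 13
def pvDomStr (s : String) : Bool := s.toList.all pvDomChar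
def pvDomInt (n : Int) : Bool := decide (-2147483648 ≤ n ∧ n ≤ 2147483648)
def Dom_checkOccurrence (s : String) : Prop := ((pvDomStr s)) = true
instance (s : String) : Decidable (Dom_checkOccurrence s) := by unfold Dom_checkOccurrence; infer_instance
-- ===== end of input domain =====

-- B replaces A's dict of repeated s.count scans with sort-then-group run lengths (alternative algorithm).

-- ===== PORT A =====
-- the 'for x in value: if x != value[0]: return False' loop (value[0] passed in as v0)
def checkLoopA (v0 : Int) : List Int → Bool
  | [] => true
  | x :: rest => if x ≠ v0 then false else checkLoopA v0 rest

def checkOccurrence (s : String) : Bool :=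
  -- dict = {}; for char in s: dict[char] = s.count(char)
  let d : PySem.Dict Char Int :=
    s.toList.foldl (fun d c => d.insert c ((PySem.Chars.count s.toList [c] : Nat) : Int)) PySem.Dict.empty
  -- value = list(dict.values())
  let value := d.values
  -- value[0] is only evaluated when the loop body runs, i.e. when value is nonempty
  match value with
  | [] => true
  | v0 :: _ => checkLoopA v0 value

-- ===== PORT B =====
-- the outer while loop: at each step take the run of characters equal to the first, record its length
def runsB : List Char → List Int
  | [] => []
  | c :: rest =>
      (((rest.takeWhile (fun x => x == c)).length + 1 : Nat) : Int) :: runsB (rest.dropWhile (fun x => x == c))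
  termination_by l => l.length
  decreasing_by
    exact Nat.lt_succ_of_le (List.length_dropWhile_le _ _)

def checkOccurrence_alt (s : String) : Bool :=
  let chars := PySem.List.sorted s.toList (fun c => c) false
  let runs := runsB chars
  -- all(r == runs[0] for r in runs): runs[0] only forced when runs is nonempty
  match runs with
  | [] => true
  | r0 :: _ => runs.all (fun r => r == r0)

-- ===== PRECONDITION & SPEC =====
def Spec_checkOccurrence (s : String) (out : Bool) : Prop := out = checkOccurrence_alt s
instance (s : String) (out : Bool) : Decidable (Spec_checkOccurrence s out) := by unfold Spec_checkOccurrence; infer_instance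

-- ===== CLAIM (what is proved, stated in full; the proofs are below) =====
def Claim_equal_checkOccurrence : Prop := ∀ (s : String), Dom_checkOccurrence s → Spec_checkOccurrence s (checkOccurrence s)

-- ===== LEMMAS AND PROOFS =====

-- the common shape of both final loops: a nonempty list is checked against its head
def pvAllEq (xs : List Int) : Bool :=
  match xs with
  | [] => true
  | v0 :: _ => xs.all (fun x => x == v0)

theorem pvAllEq_iff (xs : List Int) : pvAllEq xs = true ↔ ∀ x ∈ xs, ∀ y ∈ xs, x = y := by
  cases xs with
  | nil => simp [pvAllEq]
  | cons v0 tl =>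
    simp only [pvAllEq, List.all_eq_true, beq_iff_eq]
    constructor
    · intro h x hx y hy
      rw [h x hx, h y hy]
    · intro h x hx
      exact h x hx v0 (List.mem_cons_self)

-- abstract glue: a list of Ints whose members are exactly the counts g c, c ∈ S
theorem pvAllEq_counts (xs : List Int) (S : List Char) (g : Char → Nat)
    (h1 : ∀ x ∈ xs, ∃ c ∈ S, x = (g c : Int)) (h2 : ∀ c ∈ S, ((g c : Nat) : Int) ∈ xs) :
    (pvAllEq xs = true ↔ ∀ c ∈ S, ∀ d ∈ S, g c = g d) := by
  rw [pvAllEq_iff]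
  constructor
  · intro h c hc d hd
    exact_mod_cast h _ (h2 c hc) _ (h2 d hd)
  · intro h x hx y hy
    obtain ⟨c, hc, hxc⟩ := h1 x hx
    obtain ⟨d, hd, hyd⟩ := h1 y hy
    rw [hxc, hyd]
    exact_mod_cast h c hc d hd

-- Python's s.count(c) for a single character c is the character count
theorem go_count (c : Char) (l : List Char) : ∀ (fuel acc : Nat), l.length ≤ fuel →
    PySem.Chars.count.go [c] fuel l acc = acc + l.count c := by
  induction l with
  | nil => intro fuel acc _; cases fuel <;> simp [PySem.Chars.count.go]
  | cons h t ih =>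
    intro fuel acc hle
    cases fuel with
    | zero => simp at hle
    | succ f =>
      rw [PySem.Chars.count.go]
      simp only [List.length] at *
      by_cases hc : c = h
      · subst hc
        simp [List.isPrefixOf, ih f (acc + 1) (by omega)]
        omega
      · simp [List.isPrefixOf, Ne.symm hc, hc, ih f acc (by omega)]

theorem count_single (l : List Char) (c : Char) : PySem.Chars.count l [c] = l.count c := by
  rw [PySem.Chars.count]
  simp [go_count c l l.length 0 le_rfl]

-- the dict-building fold: lookups after the loop
theorem get?_foldl_insert_const (f : Char → Int) (l : List Char) (d : PySem.Dict Char Int) (k : Char) :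
    (l.foldl (fun d c => d.insert c (f c)) d).get? k = if k ∈ l then some (f k) else d.get? k := by
  induction l generalizing d with
  | nil => simp
  | cons c t ih =>
    simp only [List.foldl_cons, ih, PySem.Dict.get?_insert, List.mem_cons]
    by_cases hk : k ∈ t
    · simp [hk]
    · by_cases hkc : k = c <;> simp [hk, hkc]

theorem values_char_dict (f : Char → Int) (l : List Char) :
    (l.foldl (fun d c => d.insert c (f c)) PySem.Dict.empty).values
      = (PySem.List.dedup l).map f := by
  have hk : (l.foldl (fun d c => d.insert c (f c)) PySem.Dict.empty).keys = PySem.List.dedup l := by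
    have := PySem.Dict.keys_foldl_insert l (fun _ c => f c) PySem.Dict.empty
    simpa [PySem.Set.update, PySem.Set.ofList_eq_foldl, PySem.Dict.empty] using this
  have hnd : (l.foldl (fun d c => d.insert c (f c)) PySem.Dict.empty).keys.Nodup := by
    rw [hk]; exact PySem.List.nodup_dedup l
  rw [PySem.Dict.values_eq_map_keys _ hnd 0, hk]
  apply List.map_congr_left
  intro c hc
  have hcl : c ∈ l := (PySem.List.mem_dedup l c).mp hc
  simp [PySem.Dict.getD, get?_foldl_insert_const, hcl]

-- A's final loop is List.all (· == v0)
theorem checkLoopA_eq_all (v0 : Int) (xs : List Int) :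
    checkLoopA v0 xs = xs.all (fun x => x == v0) := by
  induction xs with
  | nil => rfl
  | cons x rest ih =>
    rw [checkLoopA]
    by_cases h : x = v0 <;> simp [h, ih]

-- ---- facts about runsB on a sorted list ----

-- after dropping the run of c, every remaining element is strictly above c
theorem dropWhile_gt (c : Char) (rest : List Char) (hp : rest.Pairwise (fun a b => a ≤ b))
    (hall : ∀ y ∈ rest, c ≤ y) :
    ∀ x ∈ rest.dropWhile (fun x => x == c), c < x := by
  intro x hx
  have hsub : (rest.dropWhile (fun x => x == c)).Sublist rest := List.dropWhile_sublist _
  have hpd : (rest.dropWhile (fun x => x == c)).Pairwise (fun a b => a ≤ b) := List.Pairwise.sublist hsub hp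
  cases hdr : rest.dropWhile (fun x => x == c) with
  | nil => simp [hdr] at hx
  | cons d dr' =>
    have hd : (d == c) = false := by
      have := List.head_dropWhile_not (fun x => x == c) (l := rest) (by simp [hdr])
      simpa [hdr] using this
    have hdc : d ≠ c := by simpa using hd
    have hdrest : d ∈ rest := hsub.mem (by simp [hdr])
    have hcd : c < d := lt_of_le_of_ne (hall d hdrest) (Ne.symm hdc)
    rw [hdr] at hx hpd
    rcases List.mem_cons.mp hx with h | h
    · exact h ▸ hcd
    · exact lt_of_lt_of_le hcd ((List.pairwise_cons.mp hpd).1 x h)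

theorem run_head_count (c : Char) (rest : List Char) (hp : (c :: rest).Pairwise (fun a b => a ≤ b)) :
    ((rest.takeWhile (fun x => x == c)).length + 1) = (c :: rest).count c := by
  have hall : ∀ y ∈ rest, c ≤ y := (List.pairwise_cons.mp hp).1
  have hpr : rest.Pairwise (fun a b => a ≤ b) := (List.pairwise_cons.mp hp).2
  have htake : (rest.takeWhile (fun x => x == c)).count c = (rest.takeWhile (fun x => x == c)).length := by
    apply List.count_eq_length.mpr
    intro y hy
    have hy' : (y == c) = true := List.mem_takeWhile_imp (p := fun x => x == c) hy
    exact (eq_of_beq hy').symm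
  have hdrop : (rest.dropWhile (fun x => x == c)).count c = 0 := by
    apply List.count_eq_zero.mpr
    intro hmem
    exact absurd rfl (ne_of_gt (dropWhile_gt c rest hpr hall c hmem))
  have hrest : rest.count c = (rest.takeWhile (fun x => x == c)).length := by
    conv_lhs => rw [← List.takeWhile_append_dropWhile (p := fun x => x == c) (l := rest)]
    rw [List.count_append, htake, hdrop]
    omega
  simp [hrest]


theorem count_in_drop (c c' : Char) (rest : List Char) (hp : (c :: rest).Pairwise (fun a b => a ≤ b))
    (hc' : c' ∈ rest.dropWhile (fun x => x == c)) :
    (rest.dropWhile (fun x => x == c)).count c' = (c :: rest).count c' := by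
  have hall : ∀ y ∈ rest, c ≤ y := (List.pairwise_cons.mp hp).1
  have hpr : rest.Pairwise (fun a b => a ≤ b) := (List.pairwise_cons.mp hp).2
  have hlt : c < c' := dropWhile_gt c rest hpr hall c' hc'
  have hne : c' ≠ c := ne_of_gt hlt
  have htake : (rest.takeWhile (fun x => x == c)).count c' = 0 := by
    apply List.count_eq_zero.mpr
    intro hmem
    have := List.mem_takeWhile_imp hmem
    simp at this
    exact hne this
  have hr : rest.count c' = (rest.dropWhile (fun x => x == c)).count c' := by
    conv_lhs => rw [← List.takeWhile_append_dropWhile (p := fun x => x == c) (l := rest)]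
    rw [List.count_append, htake, Nat.zero_add]
  rw [List.count_cons, hr]
  split_ifs with h
  · simp_all
  · simp

theorem runs_spec (m : List Char) (hp : m.Pairwise (fun a b => a ≤ b)) :
    (∀ r ∈ runsB m, ∃ c ∈ m, r = (m.count c : Int)) ∧
    (∀ c ∈ m, ((m.count c : Nat) : Int) ∈ runsB m) := by
  induction m using runsB.induct with
  | case1 => simp [runsB]
  | case2 c rest ih =>
    have hpr : rest.Pairwise (fun a b => a ≤ b) := (List.pairwise_cons.mp hp).2
    have hpd : (rest.dropWhile (fun x => x == c)).Pairwise (fun a b => a ≤ b) :=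
      List.Pairwise.sublist (List.dropWhile_sublist _) hpr
    obtain ⟨ih1, ih2⟩ := ih hpd
    have hdsub : ∀ x ∈ rest.dropWhile (fun x => x == c), x ∈ c :: rest := fun x hx =>
      List.mem_cons_of_mem _ ((List.dropWhile_sublist _).mem hx)
    have hhead : (((rest.takeWhile (fun x => x == c)).length + 1 : Nat) : Int) = (((c :: rest).count c : Nat) : Int) := by
      exact_mod_cast congrArg (fun n : Nat => (n : Int)) (run_head_count c rest hp)
    constructor
    · intro r hr
      rw [runsB] at hr
      rcases List.mem_cons.mp hr with h | h
      · exact ⟨c, by simp, by rw [h, hhead]⟩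
      · obtain ⟨c', hc', hrc⟩ := ih1 r h
        exact ⟨c', hdsub c' hc', by rw [hrc]; exact_mod_cast congrArg (fun n : Nat => (n : Int)) (count_in_drop c c' rest hp hc')⟩
    · intro c' hc'
      rw [runsB]
      rcases List.mem_cons.mp hc' with h | h
      · subst h
        exact List.mem_cons.mpr (Or.inl hhead.symm)
      · by_cases hct : c' ∈ rest.dropWhile (fun x => x == c)
        · have hmem := ih2 c' hct
          rw [count_in_drop c c' rest hp hct] at hmem
          exact List.mem_cons_of_mem _ hmem
        · have hceq : c' = c := by
            rcases List.mem_append.mp (by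
              rw [List.takeWhile_append_dropWhile (p := fun x => x == c) (l := rest)]; exact h) with ht | hd
            · have := List.mem_takeWhile_imp ht; simpa using this
            · exact absurd hd hct
          subst hceq
          exact List.mem_cons.mpr (Or.inl hhead.symm)

-- ---- both programs decide "all characters occur equally often" ----

theorem checkOccurrence_eq_pvAllEq (s : String) :
    checkOccurrence s = pvAllEq ((s.toList.foldl
      (fun d c => d.insert c ((PySem.Chars.count s.toList [c] : Nat) : Int)) PySem.Dict.empty).values) := by
  simp only [checkOccurrence]
  cases hv : (s.toList.foldl
      (fun d c => d.insert c ((PySem.Chars.count s.toList [c] : Nat) : Int)) PySem.Dict.empty).values with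
  | nil => rfl
  | cons v0 tl => simp only [pvAllEq]; exact checkLoopA_eq_all v0 _

theorem checkOccurrence_alt_eq_pvAllEq (s : String) :
    checkOccurrence_alt s = pvAllEq (runsB (PySem.List.sorted s.toList (fun c => c) false)) := by
  simp only [checkOccurrence_alt]
  cases runsB (PySem.List.sorted s.toList (fun c => c) false) <;> rfl

theorem checkOccurrence_iff (s : String) :
    checkOccurrence s = true ↔ ∀ c ∈ s.toList, ∀ d ∈ s.toList, s.toList.count c = s.toList.count d := by
  rw [checkOccurrence_eq_pvAllEq]
  have hv : (s.toList.foldl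
      (fun d c => d.insert c ((PySem.Chars.count s.toList [c] : Nat) : Int)) PySem.Dict.empty).values
      = (PySem.List.dedup s.toList).map (fun c => ((s.toList.count c : Nat) : Int)) := by
    rw [values_char_dict (fun c => ((PySem.Chars.count s.toList [c] : Nat) : Int)) s.toList]
    apply List.map_congr_left
    intro c _
    rw [count_single]
  rw [hv]
  apply pvAllEq_counts _ s.toList (fun c => s.toList.count c)
  · intro x hx
    obtain ⟨c, hc, hxc⟩ := List.mem_map.mp hx
    exact ⟨c, (PySem.List.mem_dedup _ _).mp hc, hxc.symm⟩
  · intro c hc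
    exact List.mem_map.mpr ⟨c, (PySem.List.mem_dedup _ _).mpr hc, rfl⟩

theorem checkOccurrence_alt_iff (s : String) :
    checkOccurrence_alt s = true ↔ ∀ c ∈ s.toList, ∀ d ∈ s.toList, s.toList.count c = s.toList.count d := by
  rw [checkOccurrence_alt_eq_pvAllEq]
  have hperm : (PySem.List.sorted s.toList (fun c => c) false).Perm s.toList :=
    PySem.List.sorted_perm s.toList (fun c => c) false
  have hp : (PySem.List.sorted s.toList (fun c => c) false).Pairwise (fun a b => a ≤ b) :=
    PySem.List.sorted_pairwise s.toList (fun c => c)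
  obtain ⟨h1, h2⟩ := runs_spec _ hp
  apply pvAllEq_counts _ s.toList (fun c => s.toList.count c)
  · intro x hx
    obtain ⟨c, hc, hxc⟩ := h1 x hx
    exact ⟨c, hperm.mem_iff.mp hc, by rw [hxc, hperm.count_eq]⟩
  · intro c hc
    have := h2 c (hperm.mem_iff.mpr hc)
    rwa [hperm.count_eq] at this

-- ===== VERDICT (by name: the statement is the Claim_ definition above) =====
theorem checkOccurrence_spec : Claim_equal_checkOccurrence := by
  intro s _
  unfold Spec_checkOccurrence
  rw [Bool.eq_iff_iff, checkOccurrence_iff, checkOccurrence_alt_iff]
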